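-- pv_equiv track=rewrite | github.com/robpearc/novadb | src/novadb/search/msa/processing.py | concatenate_msas
-- ===== SOURCE A (Python) =====
-- from typing import Dict, FrozenSet, Iterator, List, Mapping, Optional, Protocol, Sequence, Tuple
--
-- def concatenate_msas(
--     msas: List[List[str]],
--     gap_char: str = "-",
-- ) -> List[str]:
--     """Concatenate multiple MSAs horizontally.
--
--     Used for multi-chain complex MSA construction.
--
--     Args:
--         msas: List of MSAs to concatenate.
--         gap_char: Character for gaps.
--
--     Returns:
--         Concatenated MSA.
--     """
--     if not msas:
--         return []
--
--     # Get maximum depth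
--     max_depth = max(len(msa) for msa in msas)
--
--     # Get lengths
--     lengths = [len(msa[0]) if msa else 0 for msa in msas]
--
--     result = []
--     for row_idx in range(max_depth):
--         row_parts = []
--         for msa_idx, msa in enumerate(msas):
--             if row_idx < len(msa):
--                 row_parts.append(msa[row_idx])
--             else:
--                 # Pad with gaps
--                 row_parts.append(gap_char * lengths[msa_idx])
--         result.append("".join(row_parts))
--
--     return result
-- ===== SOURCE B (Python) =====
-- def concatenate_msas(msas, gap_char="-"):
--     """Concatenate multiple MSAs horizontally.
--
--     Column-major fold: instead of building each output row by scanning all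
--     MSAs (row-major, as in the per-row loop), fold over the MSAs one at a
--     time, extending an accumulator of partial output rows to the right.
--     """
--     if not msas:
--         return []
--     max_depth = max(map(len, msas))
--     rows = [""] * max_depth
--     for msa in msas:
--         pad = gap_char * (len(msa[0]) if msa else 0)
--         rows = [rows[i] + (msa[i] if i < len(msa) else pad)
--                 for i in range(max_depth)]
--     return rows
-- ===== Notes on version B (the rewrite author's own statement) =====
-- stated objective: alternative
-- what changed: Inverts the traversal order: instead of A's row-major construction (outer loop over output rows, inner scan over all MSAs per row), B folds column-major over the MSAs with an accumulator of partial output rows, extending every row to the right by one MSA's block per step.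
import Mathlib
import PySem

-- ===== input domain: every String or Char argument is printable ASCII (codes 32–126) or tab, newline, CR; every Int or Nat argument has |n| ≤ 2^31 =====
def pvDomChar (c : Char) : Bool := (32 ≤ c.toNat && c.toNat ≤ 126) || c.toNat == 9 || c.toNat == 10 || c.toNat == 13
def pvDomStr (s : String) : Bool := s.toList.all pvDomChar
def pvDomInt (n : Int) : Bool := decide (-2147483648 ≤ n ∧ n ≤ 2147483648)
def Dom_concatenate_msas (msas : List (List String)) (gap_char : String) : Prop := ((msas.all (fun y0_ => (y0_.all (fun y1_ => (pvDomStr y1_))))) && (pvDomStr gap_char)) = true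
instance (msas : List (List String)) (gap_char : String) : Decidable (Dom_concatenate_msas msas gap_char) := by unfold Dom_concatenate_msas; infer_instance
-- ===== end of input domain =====

-- B replaces A's row-major construction (outer loop over output rows, inner scan over the MSAs)
-- by a column-major fold over the MSAs extending an accumulator of partial rows; same cost,
-- return values proved equal on all inputs.

-- shared primitive: Python's  s * n  on strings (string repetition)
def pvStrMul (s : String) (n : Nat) : String :=
  String.ofList (PySem.List.pyRepeat s.toList (n : Int))

-- Python's  s + t  on strings (exact: concatenation of the character lists)
def pvStrAdd (a b : String) : String :=
  String.ofList (a.toList ++ b.toList)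

-- row length of an MSA: len(msa[0]) if msa else 0
def pvRowLen (msa : List String) : Nat :=
  match msa with
  | [] => 0
  | s :: _ => s.toList.length

-- ===== PORT A =====
def concatenate_msas (msas : List (List String)) (gap_char : String) : List String :=
  if msas = [] then []
  else
    -- max_depth = max(len(msa) for msa in msas)
    let max_depth : Nat := msas.foldl (fun acc msa => max acc msa.length) 0
    -- lengths = [len(msa[0]) if msa else 0 for msa in msas]
    let lengths : List Nat := msas.map pvRowLen
    -- for row_idx in range(max_depth): build row_parts over enumerate(msas), append join
    (PySem.List.pyRange 0 (max_depth : Int) 1).foldl (fun result row_idx =>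
      let row_parts : List String :=
        (PySem.List.enumerate msas 0).foldl (fun row_parts p =>
          row_parts ++ [if row_idx < (p.2.length : Int)
                        then PySem.List.pyGetD p.2 row_idx ""
                        else pvStrMul gap_char (PySem.List.pyGetD lengths p.1 0)]) []
      result ++ [PySem.Str.join "" row_parts]) []

-- ===== PORT B =====
def concatenate_msas_alt (msas : List (List String)) (gap_char : String) : List String :=
  if msas = [] then []
  else
    -- max_depth = max(map(len, msas))
    let max_depth : Nat := msas.foldl (fun acc msa => max acc msa.length) 0
    -- rows = [""] * max_depth; for msa in msas: rows = [rows[i] + (msa[i] if i < len(msa) else pad) ...]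
    msas.foldl (fun rows msa =>
      let pad : String := pvStrMul gap_char (pvRowLen msa)
      (PySem.List.pyRange 0 (max_depth : Int) 1).map (fun i =>
        pvStrAdd (PySem.List.pyGetD rows i "")
          (if i < (msa.length : Int) then PySem.List.pyGetD msa i "" else pad)))
      (List.replicate max_depth "")

-- ===== PRECONDITION & SPEC =====
def Spec_concatenate_msas (msas : List (List String)) (gap_char : String) (out : List String) : Prop := out = concatenate_msas_alt msas gap_char
instance (msas : List (List String)) (gap_char : String) (out : List String) : Decidable (Spec_concatenate_msas msas gap_char out) := by unfold Spec_concatenate_msas; infer_instance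

-- ===== CLAIM (what is proved, stated in full; the proofs are below) =====
def Claim_equal_concatenate_msas : Prop := ∀ (msas : List (List String)) (gap_char : String), Dom_concatenate_msas msas gap_char → Spec_concatenate_msas msas gap_char (concatenate_msas msas gap_char)

-- ===== LEMMAS AND PROOFS =====

-- the common per-cell value: msa's row j, or the gap padding
def pvCell (gap_char : String) (m : List String) (i : Int) : String :=
  if i < (m.length : Int) then PySem.List.pyGetD m i ""
  else pvStrMul gap_char (pvRowLen m)

-- flattening intersperse with an empty separator is plain flatten
theorem flatten_intersperse_nil : ∀ (l : List (List Char)),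
    (l.intersperse ([] : List Char)).flatten = l.flatten := by
  intro l
  induction l with
  | nil => simp
  | cons x t ih =>
    cases t with
    | nil => simp
    | cons y s =>
      rw [show (x :: y :: s).intersperse ([] : List Char)
            = x :: [] :: (y :: s).intersperse ([] : List Char) from rfl]
      simp only [List.flatten_cons, List.flatten_cons] at ih ⊢
      rw [ih]
      simp

-- "".join(parts) is the concatenation of the parts' character lists
theorem join_empty_eq_flatten (parts : List String) :
    PySem.Str.join "" parts = String.ofList ((parts.map String.toList).flatten) := by
  simp only [PySem.Str.join, PySem.Chars.join, List.intercalate]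
  have h0 : String.toList "" = ([] : List Char) := rfl
  rw [h0]
  congr 1
  exact flatten_intersperse_nil _

-- the enumerate loop with a lookup into msas.map f is a plain map over msas
theorem enum_lookup {γ : Type} (f : List String → Nat) (d : Nat)
    (g : List String → Nat → γ) :
    ∀ (xs pre : List (List String)),
    (PySem.List.enumerate xs (pre.length : Int)).map
        (fun p => g p.2 (PySem.List.pyGetD ((pre ++ xs).map f) p.1 d))
      = xs.map (fun m => g m (f m)) := by
  intro xs
  induction xs with
  | nil => intro pre; simp [PySem.List.enumerate_nil]
  | cons m xs ih =>
    intro pre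
    rw [PySem.List.enumerate_cons, List.map_cons, List.map_cons]
    congr 1
    · have h1 : PySem.List.pyGetD ((pre ++ m :: xs).map f) (pre.length : Int) d = f m := by
        rw [PySem.List.pyGetD_natCast]
        rw [List.getD_eq_getElem?_getD]
        rw [List.getElem?_map]
        rw [List.getElem?_append_right (le_refl _)]
        simp
      rw [h1]
    · have h2 : ((pre.length : Int) + 1) = (((pre ++ [m]).length : Nat) : Int) := by
        simp
      rw [h2]
      have h3 : pre ++ m :: xs = (pre ++ [m]) ++ xs := by simp
      rw [h3]
      exact ih (pre ++ [m])

-- A's body equals the row-major canonical form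
theorem portA_canonical (msas : List (List String)) (gap_char : String) (md : Nat) :
    (PySem.List.pyRange 0 (md : Int) 1).foldl (fun result row_idx =>
      result ++ [PySem.Str.join ""
        ((PySem.List.enumerate msas 0).foldl (fun row_parts p =>
          row_parts ++ [if row_idx < (p.2.length : Int)
                        then PySem.List.pyGetD p.2 row_idx ""
                        else pvStrMul gap_char (PySem.List.pyGetD (msas.map pvRowLen) p.1 0)]) [])]) []
    = (List.range md).map (fun (j : Nat) =>
        PySem.Str.join "" (msas.map (fun m => pvCell gap_char m (Int.ofNat j)))) := by
  rw [PySem.List.foldl_append_singleton_eq_map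
    (f := fun row_idx =>
      PySem.Str.join ""
        ((PySem.List.enumerate msas 0).foldl (fun row_parts p =>
          row_parts ++ [if row_idx < (p.2.length : Int)
                        then PySem.List.pyGetD p.2 row_idx ""
                        else pvStrMul gap_char (PySem.List.pyGetD (msas.map pvRowLen) p.1 0)]) []))]
  rw [List.nil_append, PySem.List.pyRange_zero_nat, List.map_map]
  apply List.map_congr_left
  intro j _
  simp only [Function.comp]
  rw [PySem.List.foldl_append_singleton_eq_map
    (f := fun p : Int × List String =>
      if (j : Int) < (p.2.length : Int)
      then PySem.List.pyGetD p.2 (j : Int) ""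
      else pvStrMul gap_char (PySem.List.pyGetD (msas.map pvRowLen) p.1 0))]
  rw [List.nil_append]
  congr 1
  have := enum_lookup (f := pvRowLen) (d := 0)
    (g := fun m L => if (j : Int) < (m.length : Int)
                     then PySem.List.pyGetD m (j : Int) ""
                     else pvStrMul gap_char L) msas []
  simp only [List.nil_append, List.length_nil, Nat.cast_zero] at this
  rw [this]
  rfl

-- B's fold invariant: folding the MSAs onto partial rows (range md).map (ofList ∘ g)
-- appends each MSA's cells, column-major
theorem portB_invariant (gap_char : String) (md : Nat) :
    ∀ (xs : List (List String)) (g : Nat → List Char),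
    xs.foldl (fun rows msa =>
      (PySem.List.pyRange 0 (md : Int) 1).map (fun i =>
        pvStrAdd (PySem.List.pyGetD rows i "")
          (if i < (msa.length : Int) then PySem.List.pyGetD msa i ""
           else pvStrMul gap_char (pvRowLen msa))))
      ((List.range md).map (fun j => String.ofList (g j)))
    = (List.range md).map (fun j =>
        String.ofList (g j ++ (xs.map (fun m => (pvCell gap_char m (j : Int)).toList)).flatten)) := by
  intro xs
  induction xs with
  | nil => intro g; simp
  | cons m xs ih =>
    intro g
    rw [List.foldl_cons]
    have hstep :
        (PySem.List.pyRange 0 (md : Int) 1).map (fun i =>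
          pvStrAdd (PySem.List.pyGetD ((List.range md).map (fun j => String.ofList (g j))) i "")
            (if i < (m.length : Int) then PySem.List.pyGetD m i ""
             else pvStrMul gap_char (pvRowLen m)))
        = (List.range md).map (fun j => String.ofList (g j ++ (pvCell gap_char m (j : Int)).toList)) := by
      rw [PySem.List.pyRange_zero_nat, List.map_map]
      apply List.map_congr_left
      intro j hj
      rw [List.mem_range] at hj
      simp only [Function.comp]
      have hget : PySem.List.pyGetD ((List.range md).map (fun j => String.ofList (g j))) (j : Int) ""
          = String.ofList (g j) := by
        rw [PySem.List.pyGetD_natCast, List.getD_eq_getElem?_getD, List.getElem?_map]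
        simp [List.getElem?_range hj]
      rw [hget]
      simp [pvStrAdd, pvCell]
    rw [hstep, ih (fun j => g j ++ (pvCell gap_char m (j : Int)).toList)]
    apply List.map_congr_left
    intro j _
    simp

-- ===== VERDICT (by name: the statement is the Claim_ definition above) =====
theorem concatenate_msas_spec : Claim_equal_concatenate_msas := by
  intro msas gap_char _
  unfold Spec_concatenate_msas concatenate_msas concatenate_msas_alt
  by_cases hnil : msas = []
  · simp [hnil]
  · rw [if_neg hnil, if_neg hnil]
    set md := msas.foldl (fun acc msa => max acc msa.length) 0 with hmd
    dsimp only
    rw [portA_canonical msas gap_char md]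
    have hinit : (List.replicate md "" : List String)
        = (List.range md).map (fun j => String.ofList ((fun _ => ([] : List Char)) j)) := by
      have h0 : String.ofList ([] : List Char) = "" := rfl
      simp [h0, List.map_const']
    rw [hinit, portB_invariant gap_char md msas (fun _ => [])]
    apply List.map_congr_left
    intro j _
    rw [join_empty_eq_flatten, List.map_map]
    rfl
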